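-- pv_equiv track=rewrite | github.com/Safiullah-Saleem/Advent_of_code_2025_ | Day12/solution1.py | placements_for_orientation
-- ===== SOURCE A (Python) =====
-- from collections import defaultdict
--
-- def placements_for_orientation(coords, region_w, region_h):
--     """Generate placements for a specific orientation"""
--     if not coords:
--         return []
--     max_r = max(r for r, _ in coords)
--     max_c = max(c for _, c in coords)
--
--     placements = []
--
--     for top in range(region_h - max_r):
--         for left in range(region_w - max_c):
--             row_masks = defaultdict(int)
--             for r, c in coords:
--                 rr = top + r
--                 cc = left + c
--                 row_masks[rr] |= (1 << cc)
--
--             placements.append(tuple(sorted(row_masks.items())))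
--
--     return placements
-- ===== SOURCE B (Python) =====
-- def placements_for_orientation(coords, region_w, region_h):
--     """Generate placements for a specific orientation"""
--     if not coords:
--         return []
--     max_r = max(r for r, _ in coords)
--     max_c = max(c for _, c in coords)
--     height = region_h - max_r
--     width = region_w - max_c
--     if height <= 0 or width <= 0:
--         return []
--     # group the shape's columns into one mask per row, once
--     base = {}
--     for r, c in coords:
--         base[r] = base.get(r, 0) | (1 << c)
--     base_list = sorted(base.items())
--     # shifting each sorted (row, mask) pair keeps the sorted order
--     return [
--         tuple((top + r, mask << left) for r, mask in base_list)
--         for top in range(height)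
--         for left in range(width)
--     ]
-- ===== Notes on version B (the rewrite author's own statement) =====
-- stated objective: faster
-- what changed: Instead of rebuilding a defaultdict of row masks and re-sorting it for every (top,left) placement, B groups the coords into a sorted (row, base_mask) list once and emits each placement by shifting that list (top+r, mask<<left), which preserves the sorted order; an early return handles empty placement ranges.
import Mathlib
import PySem

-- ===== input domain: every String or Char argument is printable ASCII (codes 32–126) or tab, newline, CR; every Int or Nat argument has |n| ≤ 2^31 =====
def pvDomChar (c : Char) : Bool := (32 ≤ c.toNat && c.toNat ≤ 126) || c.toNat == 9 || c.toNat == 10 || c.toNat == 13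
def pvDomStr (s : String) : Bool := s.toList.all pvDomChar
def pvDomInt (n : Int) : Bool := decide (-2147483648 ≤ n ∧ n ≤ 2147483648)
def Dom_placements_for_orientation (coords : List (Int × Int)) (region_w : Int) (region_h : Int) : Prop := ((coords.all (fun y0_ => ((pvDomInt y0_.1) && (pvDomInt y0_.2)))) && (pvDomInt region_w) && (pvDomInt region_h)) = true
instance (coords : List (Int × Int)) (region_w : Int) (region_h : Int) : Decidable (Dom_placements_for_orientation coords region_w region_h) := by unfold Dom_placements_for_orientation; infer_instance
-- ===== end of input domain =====

-- B hoists the per-placement defaultdict build and sort out of the placement loops: the shape is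
-- grouped once into a sorted (row, mask) list and each placement is emitted by shifting that list.

-- ===== PORT A =====
-- '1 << cc' raises for negative cc in Python; here '.toNat' clamps — exactly those inputs are excluded by Pre_.
def placements_for_orientation (coords : List (Int × Int)) (region_w : Int) (region_h : Int) : List (List (Int × Int)) :=
  if coords = [] then []
  else
    let max_r : Int := (PySem.List.max? (coords.map Prod.fst) (fun x => x)).getD 0
    let max_c : Int := (PySem.List.max? (coords.map Prod.snd) (fun x => x)).getD 0
    (PySem.List.pyRange 0 (region_h - max_r) 1).foldl (fun placements top =>
      (PySem.List.pyRange 0 (region_w - max_c) 1).foldl (fun placements left =>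
        let row_masks : PySem.Dict Int Int :=
          coords.foldl (fun d p =>
            d.insert (top + p.1)
              (PySem.Int.bor (d.getD (top + p.1) 0) ((1 : Int) <<< (left + p.2).toNat)))
            (PySem.Dict.mk [])
        placements ++ [PySem.List.sorted2 row_masks.items Prod.fst Prod.snd]) placements) []

-- ===== PORT B =====
def placements_for_orientation_alt (coords : List (Int × Int)) (region_w : Int) (region_h : Int) : List (List (Int × Int)) :=
  if coords = [] then []
  else
    let max_r : Int := (PySem.List.max? (coords.map Prod.fst) (fun x => x)).getD 0
    let max_c : Int := (PySem.List.max? (coords.map Prod.snd) (fun x => x)).getD 0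
    let height : Int := region_h - max_r
    let width : Int := region_w - max_c
    if height ≤ 0 ∨ width ≤ 0 then []
    else
      let base : PySem.Dict Int Int :=
        coords.foldl (fun d p =>
          d.insert p.1 (PySem.Int.bor (d.getD p.1 0) ((1 : Int) <<< p.2.toNat)))
          (PySem.Dict.mk [])
      let base_list := PySem.List.sorted2 base.items Prod.fst Prod.snd
      (PySem.List.pyRange 0 height 1).flatMap (fun top =>
        (PySem.List.pyRange 0 width 1).map (fun left =>
          base_list.map (fun rm => (top + rm.1, rm.2 <<< left.toNat))))

-- ===== PRECONDITION & SPEC =====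
-- Pre_ excludes exactly the inputs where Python raises ValueError on a negative shift count:
-- a coordinate with a negative column while both placement loops are non-empty.
def Pre_placements_for_orientation (coords : List (Int × Int)) (region_w : Int) (region_h : Int) : Prop :=
  coords = [] ∨ (∀ p ∈ coords, 0 ≤ p.2) ∨ (∃ p ∈ coords, region_h ≤ p.1) ∨ (∃ p ∈ coords, region_w ≤ p.2)
instance (coords : List (Int × Int)) (region_w : Int) (region_h : Int) : Decidable (Pre_placements_for_orientation coords region_w region_h) := by unfold Pre_placements_for_orientation; infer_instance
def pvWitness_placements_for_orientation : (List (Int × Int)) × Int × Int := ([(0, 0), (1, 1)], 3, 3)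

def Spec_placements_for_orientation (coords : List (Int × Int)) (region_w : Int) (region_h : Int) (out : List (List (Int × Int))) : Prop := out = placements_for_orientation_alt coords region_w region_h
instance (coords : List (Int × Int)) (region_w : Int) (region_h : Int) (out : List (List (Int × Int))) : Decidable (Spec_placements_for_orientation coords region_w region_h out) := by unfold Spec_placements_for_orientation; infer_instance

-- ===== CLAIM (what is proved, stated in full; the proofs are below) =====
def Claim_equal_placements_for_orientation : Prop := ∀ (coords : List (Int × Int)) (region_w : Int) (region_h : Int), Dom_placements_for_orientation coords region_w region_h → Pre_placements_for_orientation coords region_w region_h → Spec_placements_for_orientation coords region_w region_h (placements_for_orientation coords region_w region_h)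

-- ===== LEMMAS AND PROOFS =====

-- the map A applies to B's base pair (r, mask): shift the row down by `top` and the mask left by `L`
def pvShift (top : Int) (L : Nat) (rm : Int × Int) : Int × Int := (top + rm.1, rm.2 <<< L)

theorem pv_beq_shift (top a b : Int) : (top + a == top + b) = (a == b) := by
  by_cases h : a = b
  · simp [h]
  · have h' : ¬ (top + a = top + b) := by omega
    simp [h, h']

theorem pv_natCast_shiftLeft (m : Nat) (L : Nat) : ((m : Int) <<< L) = ((m <<< L : Nat) : Int) := by
  rw [Int.shiftLeft_eq, Nat.shiftLeft_eq]
  push_cast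
  ring

theorem pv_shift_bor (a b : Int) (ha : 0 ≤ a) (hb : 0 ≤ b) (L : Nat) :
    (PySem.Int.bor a b) <<< L = PySem.Int.bor (a <<< L) (b <<< L) := by
  obtain ⟨m, rfl⟩ : ∃ m : Nat, a = (m : Int) := ⟨a.toNat, (Int.toNat_of_nonneg ha).symm⟩
  obtain ⟨n, rfl⟩ : ∃ n : Nat, b = (n : Int) := ⟨b.toNat, (Int.toNat_of_nonneg hb).symm⟩
  rw [PySem.Int.bor_natCast, pv_natCast_shiftLeft, pv_natCast_shiftLeft, pv_natCast_shiftLeft,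
      PySem.Int.bor_natCast, Nat.shiftLeft_or_distrib]

theorem pv_bor_nonneg (a b : Int) (ha : 0 ≤ a) (hb : 0 ≤ b) : 0 ≤ PySem.Int.bor a b := by
  rw [PySem.Int.bor_of_nonneg ha hb]; exact Int.natCast_nonneg _

theorem pv_shift_lt_shift (a b : Int) (L : Nat) : (a <<< L < b <<< L) ↔ a < b := by
  rw [Int.shiftLeft_eq, Int.shiftLeft_eq]
  exact mul_lt_mul_iff_of_pos_right (by positivity : (0 : Int) < 2 ^ L)

theorem pv_one_shift_nonneg (n : Nat) : (0 : Int) ≤ (1 : Int) <<< n := by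
  rw [Int.shiftLeft_eq]; positivity

theorem pv_shift_split (left c : Int) (hl : 0 ≤ left) (hc : 0 ≤ c) :
    ((1 : Int) <<< (left + c).toNat) = ((1 : Int) <<< c.toNat) <<< left.toNat := by
  rw [Int.shiftLeft_eq, Int.shiftLeft_eq, Int.shiftLeft_eq]
  rw [show (left + c).toNat = c.toNat + left.toNat by omega, pow_add]
  ring

-- find? through the key-shifted, value-shifted item list
theorem pv_find_map (l : List (Int × Int)) (top k : Int) (L : Nat) :
    (l.map (pvShift top L)).find? (fun p => p.1 == top + k)
      = (l.find? (fun p => p.1 == k)).map (pvShift top L) := by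
  induction l with
  | nil => rfl
  | cons q t ih =>
    have hpred : ((pvShift top L q).1 == top + k) = (q.1 == k) := pv_beq_shift top q.1 k
    simp only [List.map_cons, List.find?_cons, hpred]
    cases hq : (q.1 == k)
    · simpa [hq] using ih
    · simp

theorem pv_get?_map (l : List (Int × Int)) (top k : Int) (L : Nat) :
    (PySem.Dict.mk (l.map (pvShift top L))).get? (top + k)
      = ((PySem.Dict.mk l).get? k).map (fun v : Int => v <<< L) := by
  simp only [PySem.Dict.get?, pv_find_map]
  cases l.find? (fun p => p.1 == k) <;> simp [pvShift]

theorem pv_getD_map (l : List (Int × Int)) (top k : Int) (L : Nat) :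
    (PySem.Dict.mk (l.map (pvShift top L))).getD (top + k) 0
      = ((PySem.Dict.mk l).getD k 0) <<< L := by
  simp only [PySem.Dict.getD, pv_get?_map]
  cases h : (PySem.Dict.mk l).get? k <;> simp [Int.shiftLeft_eq]

theorem pv_contains_map (l : List (Int × Int)) (top k : Int) (L : Nat) :
    (PySem.Dict.mk (l.map (pvShift top L))).contains (top + k)
      = (PySem.Dict.mk l).contains k := by
  simp only [PySem.Dict.contains, List.any_map]
  induction l with
  | nil => rfl
  | cons q t ih =>
    have hpred : ((pvShift top L q).1 == top + k) = (q.1 == k) := pv_beq_shift top q.1 k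
    simp only [List.any_cons, Function.comp_apply, hpred, ih]

-- getD at default 0 is nonneg when all stored values are
theorem pv_getD_nonneg (l : List (Int × Int)) (k : Int)
    (hval : ∀ q ∈ l, 0 ≤ q.2) : 0 ≤ (PySem.Dict.mk l).getD k 0 := by
  simp only [PySem.Dict.getD, PySem.Dict.get?]
  cases h : l.find? (fun p => p.1 == k) with
  | none => simp
  | some q => exact Option.getD_some ▸ by simpa using hval q (List.mem_of_find?_eq_some h)

-- one dict step, related through pvShift
theorem pv_insert_map (l : List (Int × Int)) (top left r c : Int)
    (hl : 0 ≤ left) (hc : 0 ≤ c) (hval : ∀ q ∈ l, 0 ≤ q.2) :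
    ((PySem.Dict.mk (l.map (pvShift top left.toNat))).insert (top + r)
        (PySem.Int.bor ((PySem.Dict.mk (l.map (pvShift top left.toNat))).getD (top + r) 0)
          ((1 : Int) <<< (left + c).toNat))).items
      = (((PySem.Dict.mk l).insert r
          (PySem.Int.bor ((PySem.Dict.mk l).getD r 0) ((1 : Int) <<< c.toNat))).items).map
            (pvShift top left.toNat) := by
  have hv : (PySem.Int.bor ((PySem.Dict.mk (l.map (pvShift top left.toNat))).getD (top + r) 0)
        ((1 : Int) <<< (left + c).toNat))
      = (PySem.Int.bor ((PySem.Dict.mk l).getD r 0) ((1 : Int) <<< c.toNat)) <<< left.toNat := by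
    rw [pv_getD_map, pv_shift_split left c hl hc,
        pv_shift_bor _ _ (pv_getD_nonneg l r hval) (pv_one_shift_nonneg _)]
  rw [hv]
  simp only [PySem.Dict.insert, pv_contains_map]
  by_cases hcont : (PySem.Dict.mk l).contains r = true
  · simp only [hcont, if_true, List.map_map]
    apply List.map_congr_left
    intro q _
    by_cases h : q.1 = r
    · simp [pvShift, h]
    · have h' : ¬ (top + q.1 = top + r) := by omega
      simp [Function.comp, pvShift, h, h']
  · simp [hcont, pvShift]

theorem pv_insert_val_nonneg (l : List (Int × Int)) (r c : Int) (hval : ∀ q ∈ l, 0 ≤ q.2) :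
    ∀ q ∈ ((PySem.Dict.mk l).insert r
        (PySem.Int.bor ((PySem.Dict.mk l).getD r 0) ((1 : Int) <<< c.toNat))).items, 0 ≤ q.2 := by
  have hw : 0 ≤ PySem.Int.bor ((PySem.Dict.mk l).getD r 0) ((1 : Int) <<< c.toNat) :=
    pv_bor_nonneg _ _ (pv_getD_nonneg l r hval) (pv_one_shift_nonneg _)
  intro q hq
  simp only [PySem.Dict.insert] at hq
  split at hq
  · obtain ⟨p, hp, hpe⟩ := List.mem_map.mp hq
    split at hpe
    · simp [← hpe, hw]
    · exact hpe ▸ hval p hp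
  · rcases List.mem_append.mp hq with h | h
    · exact hval q h
    · simp only [List.mem_singleton] at h; simp [h, hw]

-- the whole dict-building fold, related through pvShift
theorem pv_fold_rel (coords : List (Int × Int)) (top left : Int) (hl : 0 ≤ left)
    (hc : ∀ p ∈ coords, 0 ≤ p.2) (l : List (Int × Int)) (hval : ∀ q ∈ l, 0 ≤ q.2) :
    (coords.foldl (fun d p =>
        d.insert (top + p.1)
          (PySem.Int.bor (d.getD (top + p.1) 0) ((1 : Int) <<< (left + p.2).toNat)))
        (PySem.Dict.mk (l.map (pvShift top left.toNat)))).items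
      = ((coords.foldl (fun d p =>
          d.insert p.1 (PySem.Int.bor (d.getD p.1 0) ((1 : Int) <<< p.2.toNat)))
          (PySem.Dict.mk l)).items).map (pvShift top left.toNat) := by
  induction coords generalizing l with
  | nil => simp
  | cons p t ih =>
    simp only [List.foldl_cons]
    have hstep := pv_insert_map l top left p.1 p.2 hl (hc p (by simp)) hval
    have hrw : ((PySem.Dict.mk (l.map (pvShift top left.toNat))).insert (top + p.1)
        (PySem.Int.bor ((PySem.Dict.mk (l.map (pvShift top left.toNat))).getD (top + p.1) 0)
          ((1 : Int) <<< (left + p.2).toNat)))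
        = PySem.Dict.mk ((((PySem.Dict.mk l).insert p.1
            (PySem.Int.bor ((PySem.Dict.mk l).getD p.1 0) ((1 : Int) <<< p.2.toNat))).items).map
              (pvShift top left.toNat)) := by
      apply PySem.Dict.ext; exact hstep
    rw [hrw]
    have := ih (fun q hq => hc q (by simp [hq]))
      (((PySem.Dict.mk l).insert p.1
        (PySem.Int.bor ((PySem.Dict.mk l).getD p.1 0) ((1 : Int) <<< p.2.toNat))).items)
      (pv_insert_val_nonneg l p.1 p.2 hval)
    simpa using this

-- insertBy commutes with a comparison-preserving map
theorem pv_insertBy_map {α β : Type} (bf : β → β → Bool) (bl : α → α → Bool) (f : α → β)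
    (hpres : ∀ a b, bf (f a) (f b) = bl a b) (x : α) (acc : List α) :
    PySem.List.insertBy bf (f x) (acc.map f) = (PySem.List.insertBy bl x acc).map f := by
  induction acc with
  | nil => rfl
  | cons y t ih =>
    by_cases h : bl x y = true
    · simp [PySem.List.insertBy, hpres, h]
    · simp [PySem.List.insertBy, hpres, h, ih]

theorem pv_foldl_insertBy_map {α β : Type} (bf : β → β → Bool) (bl : α → α → Bool) (f : α → β)
    (hpres : ∀ a b, bf (f a) (f b) = bl a b) (xs : List α) (acc : List α) :
    (xs.map f).foldl (fun acc y => PySem.List.insertBy bf y acc) (acc.map f)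
      = (xs.foldl (fun acc x => PySem.List.insertBy bl x acc) acc).map f := by
  induction xs generalizing acc with
  | nil => rfl
  | cons x t ih =>
    simp only [List.map_cons, List.foldl_cons]
    rw [pv_insertBy_map bf bl f hpres, ih]

theorem pv_sorted2_map (xs : List (Int × Int)) (top : Int) (L : Nat) :
    PySem.List.sorted2 (xs.map (pvShift top L)) Prod.fst Prod.snd
      = (PySem.List.sorted2 xs Prod.fst Prod.snd).map (pvShift top L) := by
  show (xs.map (pvShift top L)).foldl (fun acc y => PySem.List.insertBy _ y acc) []
      = (xs.foldl (fun acc x => PySem.List.insertBy _ x acc) []).map (pvShift top L)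
  rw [show ([] : List (Int × Int)) = ([] : List (Int × Int)).map (pvShift top L) from rfl]
  apply pv_foldl_insertBy_map
  intro a b
  simp only [pvShift]
  have h1 : (top + a.1 < top + b.1) ↔ (a.1 < b.1) := by omega
  have h2 : (a.2 <<< L < b.2 <<< L) ↔ (a.2 < b.2) := pv_shift_lt_shift a.2 b.2 L
  simp [h1, h2]

theorem pv_flatMap_congr {A B : Type} (l : List A) (f g : A → List B)
    (h : ∀ x ∈ l, f x = g x) : l.flatMap f = l.flatMap g := by
  induction l with
  | nil => rfl
  | cons x t ih =>
    simp only [List.flatMap_cons]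
    rw [h x (by simp), ih (fun y hy => h y (by simp [hy]))]

-- A's two appending foldl loops, as a flatMap of maps
theorem pv_loops_eq {A : Type} (R1 R2 : List Int) (g : Int → Int → A) :
    R1.foldl (fun acc top => R2.foldl (fun acc left => acc ++ [g top left]) acc) []
      = R1.flatMap (fun top => R2.map (g top)) := by
  rw [PySem.List.foldl_congr_mem R1 _ (fun acc top => acc ++ R2.map (g top)) []
      (fun acc top _ => by
        rw [PySem.List.foldl_append_eq_flatMap, ← List.map_eq_flatMap])]
  rw [PySem.List.foldl_append_eq_flatMap]
  exact List.nil_append _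

-- one placement of A is B's base placement, shifted
theorem pv_place_eq (coords : List (Int × Int)) (top left : Int) (hl : 0 ≤ left)
    (hcols : ∀ p ∈ coords, 0 ≤ p.2) :
    PySem.List.sorted2
      ((coords.foldl (fun d p =>
          d.insert (top + p.1)
            (PySem.Int.bor (d.getD (top + p.1) 0) ((1 : Int) <<< (left + p.2).toNat)))
          (PySem.Dict.mk [])).items) Prod.fst Prod.snd
    = (PySem.List.sorted2
        ((coords.foldl (fun d p =>
            d.insert p.1 (PySem.Int.bor (d.getD p.1 0) ((1 : Int) <<< p.2.toNat)))
            (PySem.Dict.mk [])).items) Prod.fst Prod.snd).map (pvShift top left.toNat) := by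
  have h := pv_fold_rel coords top left hl hcols [] (by simp)
  simp only [List.map_nil] at h
  rw [h, pv_sorted2_map]

-- ===== VERDICT (by name: the statement is the Claim_ definition above) =====
theorem placements_for_orientation_spec : Claim_equal_placements_for_orientation := by
  intro coords region_w region_h _ hpre
  unfold Spec_placements_for_orientation
  by_cases hnil : coords = []
  · simp [placements_for_orientation, placements_for_orientation_alt, hnil]
  · simp only [placements_for_orientation, placements_for_orientation_alt, hnil, if_false]
    by_cases hH : region_h - (PySem.List.max? (coords.map Prod.fst) (fun x => x)).getD 0 ≤ 0
    · rw [PySem.List.pyRange_one_eq_nil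
          (a := (0:Int)) (b := region_h - (PySem.List.max? (coords.map Prod.fst) (fun x => x)).getD 0) hH]
      simp [hH]
    · by_cases hW : region_w - (PySem.List.max? (coords.map Prod.snd) (fun x => x)).getD 0 ≤ 0
      · rw [PySem.List.pyRange_one_eq_nil
            (a := (0:Int)) (b := region_w - (PySem.List.max? (coords.map Prod.snd) (fun x => x)).getD 0) hW]
        simp only [List.foldl_nil]
        rw [if_pos (Or.inr hW)]
        exact List.foldl_fixed _
      · have hcols : ∀ p ∈ coords, 0 ≤ p.2 := by
          have hmaxr : ∀ p ∈ coords, p.1 ≤ (PySem.List.max? (coords.map Prod.fst) (fun x => x)).getD 0 := by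
            intro p hp
            cases h : PySem.List.max? (coords.map Prod.fst) (fun x => x) with
            | none =>
              exact absurd ((PySem.List.max?_eq_none_iff _ _).mp h) (by simp [hnil])
            | some m =>
              have := PySem.List.max?_isMax h p.1 (List.mem_map.mpr ⟨p, hp, rfl⟩)
              simpa using this
          have hmaxc : ∀ p ∈ coords, p.2 ≤ (PySem.List.max? (coords.map Prod.snd) (fun x => x)).getD 0 := by
            intro p hp
            cases h : PySem.List.max? (coords.map Prod.snd) (fun x => x) with
            | none =>
              exact absurd ((PySem.List.max?_eq_none_iff _ _).mp h) (by simp [hnil])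
            | some m =>
              have := PySem.List.max?_isMax h p.2 (List.mem_map.mpr ⟨p, hp, rfl⟩)
              simpa using this
          rcases hpre with h | h | ⟨p, hp, h⟩ | ⟨p, hp, h⟩
          · exact absurd h hnil
          · exact h
          · exact absurd h (by have := hmaxr p hp; omega)
          · exact absurd h (by have := hmaxc p hp; omega)
        rw [if_neg (by omega)]
        rw [pv_loops_eq]
        apply pv_flatMap_congr
        intro top _
        apply List.map_congr_left
        intro left hleft
        have hl : 0 ≤ left := (PySem.List.mem_pyRange_one.mp hleft).1
        simpa only [pvShift, Int.shiftLeft_natCast_right] using pv_place_eq coords top left hl hcols
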